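-- pv_equiv track=rewrite | github.com/thierryxdp/TCC | problems/835/solution_350202.py | melhor_volta
-- ===== SOURCE A (Python) =====
-- def melhor_volta(matriz):
--     '''retorna, a partir da matriz 6x10, uma tupla com quem fez
--     a melhor volta, o tempo e qual foi a volta
--     list->tuple'''
--     minTempos=[]
--     for sublista in matriz:
--         minTempos=minTempos+[min(sublista)]
--     indicec=list.index(minTempos,min(minTempos))
--     corredor=indicec+1
--     indicev=list.index(matriz[indicec],min(matriz[indicec]))
--     volta=indicev+1
--     return(corredor,min(minTempos),volta)
-- ===== SOURCE B (Python) =====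
-- def melhor_volta(matriz):
--     '''retorna, a partir da matriz 6x10, uma tupla com quem fez
--     a melhor volta, o tempo e qual foi a volta
--     list->tuple'''
--     best = None
--     for i, linha in enumerate(matriz):
--         for j, t in enumerate(linha):
--             if best is None or t < best:
--                 best, bi, bj = t, i, j
--     return (bi + 1, best, bj + 1)
-- ===== Notes on version B (the rewrite author's own statement) =====
-- stated objective: alternative
-- what changed: Replaced A's three-pass scheme (build a per-row-minimum list by repeated list concatenation, then min+index over it, then min+index inside the chosen row) with a single nested scan keeping the running minimum and its row/column, updating on strict '<' so the first row-major minimum wins; Pre_ excludes the empty matrix and matrices with an empty row, on which A's min() raises ValueError.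
import Mathlib
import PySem

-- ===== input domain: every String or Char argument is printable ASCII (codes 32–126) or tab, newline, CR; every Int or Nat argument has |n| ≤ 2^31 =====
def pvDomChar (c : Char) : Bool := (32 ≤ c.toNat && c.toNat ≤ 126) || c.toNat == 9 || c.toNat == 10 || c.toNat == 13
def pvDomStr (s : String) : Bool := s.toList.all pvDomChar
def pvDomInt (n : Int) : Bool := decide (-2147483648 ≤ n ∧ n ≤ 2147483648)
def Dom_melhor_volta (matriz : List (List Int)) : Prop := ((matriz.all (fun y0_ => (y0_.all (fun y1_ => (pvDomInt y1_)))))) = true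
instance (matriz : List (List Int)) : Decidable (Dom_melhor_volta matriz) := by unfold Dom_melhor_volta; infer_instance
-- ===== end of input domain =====

-- B replaces A's three passes (per-row-minimum list built by repeated concatenation, then min+index over it,
-- then min+index inside the chosen row) with one nested scan keeping the running minimum and its row/column
-- (strict '<', so the first row-major minimum wins); objective: alternative decomposition.


-- ===== PORT A =====
def melhor_volta (matriz : List (List Int)) : Int × Int × Int :=
  let minTempos : List Int :=
    matriz.foldl (fun acc sublista => acc ++ [(PySem.List.min? sublista (fun y => y)).getD 0]) []
  let indicec : Nat :=
    (PySem.List.index? minTempos ((PySem.List.min? minTempos (fun y => y)).getD 0)).getD 0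
  let corredor : Int := (indicec : Int) + 1
  let linha : List Int := (PySem.List.pyGet? matriz (indicec : Int)).getD []
  let indicev : Nat :=
    (PySem.List.index? linha ((PySem.List.min? linha (fun y => y)).getD 0)).getD 0
  let volta : Int := (indicev : Int) + 1
  (corredor, (PySem.List.min? minTempos (fun y => y)).getD 0, volta)

-- ===== PORT B =====
def bStep (i : Int) (st : Option (Int × Int × Int)) (q : Int × Int) : Option (Int × Int × Int) :=
  match st with
  | none => some (q.2, i, q.1)
  | some (b, bi, bj) => if q.2 < b then some (q.2, i, q.1) else some (b, bi, bj)

def bRow (st : Option (Int × Int × Int)) (p : Int × List Int) : Option (Int × Int × Int) :=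
  (PySem.List.enumerate p.2 0).foldl (bStep p.1) st

def melhor_volta_alt (matriz : List (List Int)) : Int × Int × Int :=
  match (PySem.List.enumerate matriz 0).foldl bRow none with
  | some (b, bi, bj) => (bi + 1, b, bj + 1)
  | none => (0, 0, 0)   -- no element was ever seen: Source B raises NameError here; outside Pre_

-- ===== PRECONDITION & SPEC =====
-- A raises ValueError (min() of an empty sequence) on an empty matrix or on a matrix with an empty row; excluded.
def Pre_melhor_volta (matriz : List (List Int)) : Prop :=
  matriz ≠ [] ∧ ∀ r ∈ matriz, r ≠ []
instance (matriz : List (List Int)) : Decidable (Pre_melhor_volta matriz) := by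
  unfold Pre_melhor_volta; infer_instance

def pvWitness_melhor_volta : List (List Int) := [[3, 1], [2, 2]]

def Spec_melhor_volta (matriz : List (List Int)) (out : Int × Int × Int) : Prop := out = melhor_volta_alt matriz
instance (matriz : List (List Int)) (out : Int × Int × Int) : Decidable (Spec_melhor_volta matriz out) := by unfold Spec_melhor_volta; infer_instance

-- ===== CLAIM (what is proved, stated in full; the proofs are below) =====
def Claim_equal_melhor_volta : Prop := ∀ (matriz : List (List Int)), Dom_melhor_volta matriz → Pre_melhor_volta matriz → Spec_melhor_volta matriz (melhor_volta matriz)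

-- ===== LEMMAS AND PROOFS =====

def rmin : List Int → Int
  | [] => 0
  | x :: t => t.foldl min x

lemma foldl_min_le (xs : List Int) : ∀ b : Int, xs.foldl min b ≤ b := by
  induction xs with
  | nil => intro b; exact le_refl b
  | cons c t ih => intro b; exact le_trans (ih (min b c)) (min_le_left b c)

lemma foldl_min_assoc (xs : List Int) : ∀ a b : Int, xs.foldl min (min a b) = min a (xs.foldl min b) := by
  induction xs with
  | nil => intro a b; rfl
  | cons c t ih => intro a b; simp only [List.foldl_cons]; rw [min_assoc, ih]

lemma rmin_cons (x : Int) (t : List Int) (b : Int) :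
    (x :: t).foldl min b = min b (rmin (x :: t)) := by
  simp only [List.foldl_cons, rmin]; exact foldl_min_assoc t b x

lemma idxOf?_getD {α : Type} [DecidableEq α] (xs : List α) (v : α) (h : v ∈ xs) :
    List.idxOf? v xs = some (xs.idxOf v) := by
  induction xs with
  | nil => cases h
  | cons x t ih =>
    by_cases hx : x = v
    · subst hx; simp [List.idxOf?_cons]
    · have hv : v ∈ t := by cases h with | head => exact absurd rfl hx | tail _ h => exact h
      simp [List.idxOf?_cons, hx, ih hv]

lemma inner_some (t : List Int) : ∀ (s b bi bj : Int) (i : Int),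
    (PySem.List.enumerate t s).foldl (bStep i) (some (b, bi, bj)) =
      if t.foldl min b < b then
        some (t.foldl min b, i, s + (t.idxOf (t.foldl min b) : Int))
      else some (b, bi, bj) := by
  induction t with
  | nil => intro s b bi bj i; simp [PySem.List.enumerate_nil]
  | cons x r ih =>
    intro s b bi bj i
    rw [PySem.List.enumerate_cons, List.foldl_cons]
    by_cases hx : x < b
    · have hstep : bStep i (some (b, bi, bj)) (s, x) = some (x, i, s) := by
        simp [bStep, hx]
      rw [hstep, ih (s+1) x i s i]
      have hmin : (x :: r).foldl min b = r.foldl min x := by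
        simp only [List.foldl_cons, min_eq_right (le_of_lt hx)]
      by_cases hm : r.foldl min x < x
      · have hlt : (x :: r).foldl min b < b := by rw [hmin]; exact lt_trans hm hx
        have hne : x ≠ r.foldl min x := by intro he; rw [← he] at hm; exact lt_irrefl x hm
        rw [if_pos hm, if_pos hlt, hmin]
        have : (x :: r).idxOf (r.foldl min x) = r.idxOf (r.foldl min x) + 1 := by
          simp [hne]
        rw [this]; push_cast; ring_nf
      · have hx2 : r.foldl min x = x := le_antisymm (foldl_min_le r x) (not_lt.mp hm)
        rw [if_neg hm, hmin, hx2, if_pos hx]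
        simp
    · have hstep : bStep i (some (b, bi, bj)) (s, x) = some (b, bi, bj) := by
        simp [bStep, hx]
      rw [hstep, ih (s+1) b bi bj i]
      have hmin : (x :: r).foldl min b = r.foldl min b := by
        simp only [List.foldl_cons, min_eq_left (not_lt.mp hx)]
      rw [hmin]
      by_cases hm : r.foldl min b < b
      · have hne : x ≠ r.foldl min b := by
          intro he; rw [← he] at hm; exact hx hm
        rw [if_pos hm, if_pos hm]
        have : (x :: r).idxOf (r.foldl min b) = r.idxOf (r.foldl min b) + 1 := by
          simp [hne]
        rw [this]; push_cast; ring_nf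
      · rw [if_neg hm, if_neg hm]

lemma inner_some_ne (r : List Int) (hr : r ≠ []) (i b bi bj : Int) :
    (PySem.List.enumerate r 0).foldl (bStep i) (some (b, bi, bj)) =
      if rmin r < b then some (rmin r, i, (r.idxOf (rmin r) : Int)) else some (b, bi, bj) := by
  obtain ⟨x, t, rfl⟩ : ∃ x t, r = x :: t := by
    cases r with | nil => exact absurd rfl hr | cons x t => exact ⟨x, t, rfl⟩
  rw [inner_some]
  rw [rmin_cons]
  by_cases h : rmin (x :: t) < b
  · rw [if_pos (by rw [min_eq_right (le_of_lt h)]; exact h), if_pos h,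
        min_eq_right (le_of_lt h)]
    simp
  · rw [if_neg (by rw [min_eq_left (not_lt.mp h)]; exact lt_irrefl b), if_neg h]

lemma inner_none (x : Int) (t : List Int) (i s : Int) :
    (PySem.List.enumerate (x :: t) s).foldl (bStep i) none =
      some (rmin (x :: t), i, s + ((x :: t).idxOf (rmin (x :: t)) : Int)) := by
  rw [PySem.List.enumerate_cons, List.foldl_cons]
  have hstep : bStep i (none : Option (Int × Int × Int)) (s, x) = some (x, i, s) := rfl
  rw [hstep, inner_some t (s+1) x i s i]
  simp only [rmin]
  by_cases hm : t.foldl min x < x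
  · have hne : x ≠ t.foldl min x := by intro he; rw [← he] at hm; exact lt_irrefl x hm
    rw [if_pos hm]
    have : (x :: t).idxOf (t.foldl min x) = t.idxOf (t.foldl min x) + 1 := by
      simp [hne]
    rw [this]; push_cast; ring_nf
  · have hx2 : t.foldl min x = x := le_antisymm (foldl_min_le t x) (not_lt.mp hm)
    rw [if_neg hm, hx2]
    simp

lemma outer_some (rows : List (List Int)) : ∀ (i b bi bj : Int), (∀ r ∈ rows, r ≠ []) →
    (PySem.List.enumerate rows i).foldl bRow (some (b, bi, bj)) =
      if (rows.map rmin).foldl min b < b then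
        some ((rows.map rmin).foldl min b,
              i + (((rows.map rmin).idxOf ((rows.map rmin).foldl min b)) : Int),
              (((rows.getD ((rows.map rmin).idxOf ((rows.map rmin).foldl min b)) []).idxOf
                  ((rows.map rmin).foldl min b)) : Int))
      else some (b, bi, bj) := by
  induction rows with
  | nil => intro i b bi bj _; simp [PySem.List.enumerate_nil]
  | cons r t ih =>
    intro i b bi bj hne
    have hr : r ≠ [] := hne r (List.mem_cons_self)
    have ht : ∀ u ∈ t, u ≠ [] := fun u hu => hne u (List.mem_cons_of_mem r hu)
    rw [PySem.List.enumerate_cons, List.foldl_cons]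
    have hrow : bRow (some (b, bi, bj)) (i, r) =
        if rmin r < b then some (rmin r, i, (r.idxOf (rmin r) : Int)) else some (b, bi, bj) := by
      simp only [bRow]; exact inner_some_ne r hr i b bi bj
    have hmins : ((r :: t).map rmin).foldl min b = (t.map rmin).foldl min (min b (rmin r)) := by
      simp [List.foldl_cons]
    by_cases h1 : rmin r < b
    · rw [hrow, if_pos h1, ih (i+1) (rmin r) i (r.idxOf (rmin r) : Int) ht]
      have hM : ((r :: t).map rmin).foldl min b = (t.map rmin).foldl min (rmin r) := by
        rw [hmins, min_eq_right (le_of_lt h1)]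
      by_cases hm : (t.map rmin).foldl min (rmin r) < rmin r
      · have hlt : (t.map rmin).foldl min (rmin r) < b := lt_trans hm h1
        rw [if_pos hm, if_pos (by rw [hM]; exact hlt)]
        have hne2 : rmin r ≠ (t.map rmin).foldl min (rmin r) := by
          intro he; rw [← he] at hm; exact lt_irrefl _ hm
        rw [hM]
        have hidx : ((r :: t).map rmin).idxOf ((t.map rmin).foldl min (rmin r)) =
            (t.map rmin).idxOf ((t.map rmin).foldl min (rmin r)) + 1 := by
          simp [hne2]
        rw [hidx]
        have hgetD : (r :: t).getD ((t.map rmin).idxOf ((t.map rmin).foldl min (rmin r)) + 1) [] =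
            t.getD ((t.map rmin).idxOf ((t.map rmin).foldl min (rmin r))) [] := rfl
        rw [hgetD]; push_cast; ring_nf
      · have heq : (t.map rmin).foldl min (rmin r) = rmin r :=
          le_antisymm (foldl_min_le _ _) (not_lt.mp hm)
        rw [if_neg hm, hM, heq, if_pos h1]
        simp
    · rw [hrow, if_neg h1, ih (i+1) b bi bj ht]
      have hM : ((r :: t).map rmin).foldl min b = (t.map rmin).foldl min b := by
        rw [hmins, min_eq_left (not_lt.mp h1)]
      rw [hM]
      by_cases hm : (t.map rmin).foldl min b < b
      · have hne2 : rmin r ≠ (t.map rmin).foldl min b := by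
          intro he; rw [← he] at hm; exact h1 hm
        rw [if_pos hm, if_pos hm]
        have hidx : ((r :: t).map rmin).idxOf ((t.map rmin).foldl min b) =
            (t.map rmin).idxOf ((t.map rmin).foldl min b) + 1 := by
          simp [hne2]
        rw [hidx]
        have hgetD : (r :: t).getD ((t.map rmin).idxOf ((t.map rmin).foldl min b) + 1) [] =
            t.getD ((t.map rmin).idxOf ((t.map rmin).foldl min b)) [] := rfl
        rw [hgetD]; push_cast; ring_nf
      · rw [if_neg hm, if_neg hm]

lemma outer_none (r : List Int) (t : List (List Int)) (hr : r ≠ []) (ht : ∀ u ∈ t, u ≠ []) :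
    (PySem.List.enumerate (r :: t) 0).foldl bRow none =
      some (rmin ((r :: t).map rmin),
            ((((r :: t).map rmin).idxOf (rmin ((r :: t).map rmin))) : Int),
            ((((r :: t).getD (((r :: t).map rmin).idxOf (rmin ((r :: t).map rmin))) []).idxOf
                (rmin ((r :: t).map rmin))) : Int)) := by
  obtain ⟨x, r', rfl⟩ : ∃ x r', r = x :: r' := by
    cases r with | nil => exact absurd rfl hr | cons x r' => exact ⟨x, r', rfl⟩
  rw [PySem.List.enumerate_cons, List.foldl_cons]
  have h0 : bRow (none : Option (Int × Int × Int)) (0, x :: r') =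
      some (rmin (x :: r'), 0, ((x :: r').idxOf (rmin (x :: r')) : Int)) := by
    simp only [bRow]
    rw [inner_none x r' 0 0]; ring_nf
  rw [h0]
  norm_num only
  rw [outer_some t 1 (rmin (x :: r')) 0 (((x :: r').idxOf (rmin (x :: r'))) : Int) ht]
  have hmins : rmin (((x :: r') :: t).map rmin) = (t.map rmin).foldl min (rmin (x :: r')) := by
    simp [rmin]
  by_cases hm : (t.map rmin).foldl min (rmin (x :: r')) < rmin (x :: r')
  · have hne2 : rmin (x :: r') ≠ (t.map rmin).foldl min (rmin (x :: r')) := by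
      intro he; rw [← he] at hm; exact lt_irrefl _ hm
    rw [if_pos hm, hmins]
    have hidx : (((x :: r') :: t).map rmin).idxOf ((t.map rmin).foldl min (rmin (x :: r'))) =
        (t.map rmin).idxOf ((t.map rmin).foldl min (rmin (x :: r'))) + 1 := by
      simp [hne2]
    rw [hidx]
    have hgetD : ((x :: r') :: t).getD ((t.map rmin).idxOf ((t.map rmin).foldl min (rmin (x :: r'))) + 1) [] =
        t.getD ((t.map rmin).idxOf ((t.map rmin).foldl min (rmin (x :: r')))) [] := rfl
    rw [hgetD]; push_cast; ring_nf
  · have heq : (t.map rmin).foldl min (rmin (x :: r')) = rmin (x :: r') :=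
      le_antisymm (foldl_min_le _ _) (not_lt.mp hm)
    rw [if_neg hm, hmins, heq]
    simp
lemma min_getD (r : List Int) : (PySem.List.min? r (fun y => y)).getD 0 = rmin r := by
  cases r with
  | nil => rfl
  | cons x t => rw [PySem.List.min?_id_cons]; rfl

lemma rmin_mem (x : Int) (t : List Int) : rmin (x :: t) ∈ x :: t :=
  PySem.List.min?_mem (by rw [PySem.List.min?_id_cons]; rfl)

theorem portsEq (matriz : List (List Int)) (hne : matriz ≠ [])
    (hrows : ∀ r ∈ matriz, r ≠ []) : melhor_volta matriz = melhor_volta_alt matriz := by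
  obtain ⟨r, t, rfl⟩ : ∃ r t, matriz = r :: t := by
    cases matriz with | nil => exact absurd rfl hne | cons r t => exact ⟨r, t, rfl⟩
  have hr : r ≠ [] := hrows r List.mem_cons_self
  have ht : ∀ u ∈ t, u ≠ [] := fun u hu => hrows u (List.mem_cons_of_mem r hu)
  have hmapf : List.foldl (fun acc sublista => acc ++ [(PySem.List.min? sublista (fun y => y)).getD 0]) [] (r :: t)
      = (r :: t).map rmin := by
    rw [PySem.List.foldl_append_singleton_eq_map (fun sublista => (PySem.List.min? sublista (fun y => y)).getD 0) (r :: t) []]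
    simp [min_getD]
  have hminsne : (r :: t).map rmin = rmin r :: t.map rmin := by simp
  have hm : (PySem.List.min? ((r :: t).map rmin) (fun y => y)).getD 0 = rmin ((r :: t).map rmin) :=
    min_getD _
  have hmmem : rmin ((r :: t).map rmin) ∈ (r :: t).map rmin := by
    rw [hminsne]; exact rmin_mem _ _
  have hidx : PySem.List.index? ((r :: t).map rmin) (rmin ((r :: t).map rmin)) =
      some (((r :: t).map rmin).idxOf (rmin ((r :: t).map rmin))) := by
    rw [PySem.List.index?_eq_idxOf?]; exact idxOf?_getD _ _ hmmem
  have hklen : ((r :: t).map rmin).idxOf (rmin ((r :: t).map rmin)) < (r :: t).length := by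
    have h := List.idxOf_lt_length_of_mem hmmem
    simpa using h
  have hget : (PySem.List.pyGet? (r :: t) ((((r :: t).map rmin).idxOf (rmin ((r :: t).map rmin)) : Nat) : Int)).getD []
      = (r :: t).getD (((r :: t).map rmin).idxOf (rmin ((r :: t).map rmin))) [] := by
    rw [PySem.List.pyGet?_natCast]
    rw [List.getElem?_eq_getElem hklen, List.getD_eq_getElem _ _ hklen]
    rfl
  have hlr : rmin ((r :: t).getD (((r :: t).map rmin).idxOf (rmin ((r :: t).map rmin))) []) =
      rmin ((r :: t).map rmin) := by
    rw [List.getD_eq_getElem _ _ hklen]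
    have h2 : (((r :: t).map rmin))[((r :: t).map rmin).idxOf (rmin ((r :: t).map rmin))]'(by simpa using hklen) =
        rmin ((r :: t).map rmin) := List.getElem_idxOf _
    rw [← List.getElem_map rmin]
    exact h2
  have hlmem : (r :: t).getD (((r :: t).map rmin).idxOf (rmin ((r :: t).map rmin))) [] ∈ r :: t := by
    rw [List.getD_eq_getElem _ _ hklen]; exact List.getElem_mem _
  have hlne : (r :: t).getD (((r :: t).map rmin).idxOf (rmin ((r :: t).map rmin))) [] ≠ [] :=
    hrows _ hlmem
  obtain ⟨y, L, hL⟩ : ∃ y L', (r :: t).getD (((r :: t).map rmin).idxOf (rmin ((r :: t).map rmin))) [] = y :: L' := by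
    cases h : (r :: t).getD (((r :: t).map rmin).idxOf (rmin ((r :: t).map rmin))) [] with
    | nil => exact absurd h hlne
    | cons y L' => exact ⟨y, L', rfl⟩
  have hmmem2 : rmin ((r :: t).getD (((r :: t).map rmin).idxOf (rmin ((r :: t).map rmin))) [])
      ∈ (r :: t).getD (((r :: t).map rmin).idxOf (rmin ((r :: t).map rmin))) [] := by
    rw [hL]; exact rmin_mem _ _
  have hm2 : (PySem.List.min? ((r :: t).getD (((r :: t).map rmin).idxOf (rmin ((r :: t).map rmin))) []) (fun y => y)).getD 0
      = rmin ((r :: t).getD (((r :: t).map rmin).idxOf (rmin ((r :: t).map rmin))) []) := min_getD _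
  have hidx3 : PySem.List.index? ((r :: t).getD (((r :: t).map rmin).idxOf (rmin ((r :: t).map rmin))) [])
        (rmin ((r :: t).map rmin))
      = some (((r :: t).getD (((r :: t).map rmin).idxOf (rmin ((r :: t).map rmin))) []).idxOf
              (rmin ((r :: t).map rmin))) := by
    rw [hlr] at hmmem2
    rw [PySem.List.index?_eq_idxOf?]; exact idxOf?_getD _ _ hmmem2
  have hB := outer_none r t hr ht
  unfold melhor_volta melhor_volta_alt
  rw [hB]
  simp only [hmapf, hm, hidx, Option.getD_some, hget, hm2, hlr, hidx3]

-- ===== VERDICT (by name: the statement is the Claim_ definition above) =====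
theorem melhor_volta_spec : Claim_equal_melhor_volta := by
  intro matriz _hdom hpre
  unfold Spec_melhor_volta
  exact portsEq matriz hpre.1 hpre.2
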